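-- pv_equiv track=rewrite | github.com/shah541-g/MyPass-Manager | password_manager.py | sha256_manual
-- ===== SOURCE A (Python) =====
-- K = [
--     0x428a2f98, 0x71374491, 0xb5c0fbcf, 0xe9b5dba5, 0x3956c25b, 0x59f111f1, 0x923f82a4, 0xab1c5ed5,
--     0xd807aa98, 0x12835b01, 0x243185be, 0x550c7dc3, 0x72be5d74, 0x80deb1fe, 0x9bdc06a7, 0xc19bf174,
--     0xe49b69c1, 0xefbe4786, 0x0fc19dc6, 0x240ca1cc, 0x2de92c6f, 0x4a7484aa, 0x5cb0a9dc, 0x76f988da,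
--     0x983e5152, 0xa831c66d, 0xb00327c8, 0xbf597fc7, 0xc6e00bf3, 0xd5a79147, 0x06ca6351, 0x14292967,
--     0x27b70a85, 0x2e1b2138, 0x4d2c6dfc, 0x53380d13, 0x650a7354, 0x766a0abb, 0x81c2c92e, 0x92722c85,
--     0xa2bfe8a1, 0xa81a664b, 0xc24b8b70, 0xc76c51a3, 0xd192e819, 0xd6990624, 0xf40e3585, 0x106aa070,
--     0x19a4c116, 0x1e376c08, 0x2748774c, 0x34b0bcb5, 0x391c0cb3, 0x4ed8aa4a, 0x5b9cca4f, 0x682e6ff3,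
--     0x748f82ee, 0x78a5636f, 0x84c87814, 0x8cc70208, 0x90befffa, 0xa4506ceb, 0xbef9a3f7, 0xc67178f2
-- ]
--
-- H = [
--     0x6a09e667, 0xbb67ae85, 0x3c6ef372, 0xa54ff53a,
--     0x510e527f, 0x9b05688c, 0x1f83d9ab, 0x5be0cd19
-- ]
--
-- def rotr(x, n):
--     """Right rotate x by n bits."""
--     return (x >> n) | (x << (32 - n)) & 0xffffffff
--
-- def sha256_manual(message):
--     """Manual SHA-256 hashing of a string message."""
--     msg_bytes = message.encode('utf-8')
--     msg_len = len(msg_bytes) * 8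
--
--     padding = b'\x80' + b'\x00' * ((56 - (len(msg_bytes) + 1) % 64) % 64)
--     msg_len_bytes = (msg_len).to_bytes(8, byteorder='big')
--     padded_msg = msg_bytes + padding + msg_len_bytes
--
--     h = H.copy()
--
--     for i in range(0, len(padded_msg), 64):
--         chunk = padded_msg[i:i+64]
--         w = [0] * 64
--         for j in range(16):
--             w[j] = int.from_bytes(chunk[j*4:j*4+4], byteorder='big')
--         for j in range(16, 64):
--             s0 = rotr(w[j-15], 7) ^ rotr(w[j-15], 18) ^ (w[j-15] >> 3)
--             s1 = rotr(w[j-2], 17) ^ rotr(w[j-2], 19) ^ (w[j-2] >> 10)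
--             w[j] = (w[j-16] + s0 + w[j-7] + s1) & 0xffffffff
--
--         a, b, c, d, e, f, g, hh = h
--
--         for j in range(64):
--             S1 = rotr(e, 6) ^ rotr(e, 11) ^ rotr(e, 25)
--             ch = (e & f) ^ ((~e) & g)
--             temp1 = (hh + S1 + ch + K[j] + w[j]) & 0xffffffff
--             S0 = rotr(a, 2) ^ rotr(a, 13) ^ rotr(a, 22)
--             maj = (a & b) ^ (a & c) ^ (b & c)
--             temp2 = (S0 + maj) & 0xffffffff
--
--             hh = g
--             g = f
--             f = e
--             e = (d + temp1) & 0xffffffff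
--             d = c
--             c = b
--             b = a
--             a = (temp1 + temp2) & 0xffffffff
--
--         h[0] = (h[0] + a) & 0xffffffff
--         h[1] = (h[1] + b) & 0xffffffff
--         h[2] = (h[2] + c) & 0xffffffff
--         h[3] = (h[3] + d) & 0xffffffff
--         h[4] = (h[4] + e) & 0xffffffff
--         h[5] = (h[5] + f) & 0xffffffff
--         h[6] = (h[6] + g) & 0xffffffff
--         h[7] = (h[7] + hh) & 0xffffffff
--
--     hash_result = ''.join(f'{x:08x}' for x in h)
--     return hash_result
-- ===== SOURCE B (Python) =====
-- import hashlib
--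
--
-- def sha256_manual(message):
--     """SHA-256 of a string message, delegated to the standard library."""
--     return hashlib.sha256(message.encode('utf-8')).hexdigest()
-- ===== Notes on version B (the rewrite author's own statement) =====
-- stated objective: idiomatic
-- what changed: B replaces the whole hand-written SHA-256 (manual padding, message-schedule array, 64-round compression loop, format-string hex join) with a single standard-library call: hashlib.sha256 applied to the UTF-8 encoding of the message, returning its lowercase hexdigest.
import Mathlib
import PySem

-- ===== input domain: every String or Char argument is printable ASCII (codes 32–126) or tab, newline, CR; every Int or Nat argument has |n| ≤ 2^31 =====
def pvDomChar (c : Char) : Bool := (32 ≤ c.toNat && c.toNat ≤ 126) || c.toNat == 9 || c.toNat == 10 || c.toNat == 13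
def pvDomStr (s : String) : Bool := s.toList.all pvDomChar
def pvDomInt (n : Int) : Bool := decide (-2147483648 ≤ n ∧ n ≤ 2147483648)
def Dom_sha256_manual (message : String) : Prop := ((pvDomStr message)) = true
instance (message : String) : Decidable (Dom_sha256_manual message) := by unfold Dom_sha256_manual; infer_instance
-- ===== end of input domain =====

-- B delegates to the standard library (hashlib) instead of A's hand-written
-- SHA-256; objective: idiomatic (and measurably faster in Python, being C code).

-- ===== PORT A =====
-- module constants K and H
def pvK : List Int := [
  0x428a2f98, 0x71374491, 0xb5c0fbcf, 0xe9b5dba5, 0x3956c25b, 0x59f111f1, 0x923f82a4, 0xab1c5ed5,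
  0xd807aa98, 0x12835b01, 0x243185be, 0x550c7dc3, 0x72be5d74, 0x80deb1fe, 0x9bdc06a7, 0xc19bf174,
  0xe49b69c1, 0xefbe4786, 0x0fc19dc6, 0x240ca1cc, 0x2de92c6f, 0x4a7484aa, 0x5cb0a9dc, 0x76f988da,
  0x983e5152, 0xa831c66d, 0xb00327c8, 0xbf597fc7, 0xc6e00bf3, 0xd5a79147, 0x06ca6351, 0x14292967,
  0x27b70a85, 0x2e1b2138, 0x4d2c6dfc, 0x53380d13, 0x650a7354, 0x766a0abb, 0x81c2c92e, 0x92722c85,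
  0xa2bfe8a1, 0xa81a664b, 0xc24b8b70, 0xc76c51a3, 0xd192e819, 0xd6990624, 0xf40e3585, 0x106aa070,
  0x19a4c116, 0x1e376c08, 0x2748774c, 0x34b0bcb5, 0x391c0cb3, 0x4ed8aa4a, 0x5b9cca4f, 0x682e6ff3,
  0x748f82ee, 0x78a5636f, 0x84c87814, 0x8cc70208, 0x90befffa, 0xa4506ceb, 0xbef9a3f7, 0xc67178f2]

def pvH : List Int := [
  0x6a09e667, 0xbb67ae85, 0x3c6ef372, 0xa54ff53a,
  0x510e527f, 0x9b05688c, 0x1f83d9ab, 0x5be0cd19]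

-- rotr(x, n) with A's exact parenthesisation: (x >> n) | ((x << (32-n)) & 0xffffffff)
def rotr (x : Int) (n : Nat) : Int :=
  PySem.Int.bor (x >>> n) (PySem.Int.band (x <<< (32 - n)) 0xffffffff)

-- (msg_len).to_bytes(8, byteorder='big'): exact for 0 ≤ x < 2^64 (always the case here)
def pvToBytes8BE (x : Int) : List Int :=
  [PySem.Int.band (x >>> (56:Nat)) 255, PySem.Int.band (x >>> (48:Nat)) 255,
   PySem.Int.band (x >>> (40:Nat)) 255, PySem.Int.band (x >>> (32:Nat)) 255,
   PySem.Int.band (x >>> (24:Nat)) 255, PySem.Int.band (x >>> (16:Nat)) 255,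
   PySem.Int.band (x >>> (8:Nat)) 255, PySem.Int.band x 255]

-- body of A's outer `for i in range(0, len(padded_msg), 64)` loop, one chunk.
-- `for j in range(16)` / `range(16, 64)` are ported as List.range 16 / List.range' 16 48 (exact:
-- literal non-negative bounds); list reads w[j-15] … with indices provably in range are List.getD;
-- int.from_bytes(bs, 'big') is the big-endian fold 256*acc + b (exact for non-negative byte lists).
def pvChunkStepA (h : List Int) (chunk : List Int) : List Int :=
  let w0 := (List.range 16).foldl (fun (w : List Int) j =>
      w.set j ((PySem.List.slice chunk (some ((j*4 : Nat) : Int)) (some (((j*4 : Nat) : Int) + ((4:Nat) : Int)))).foldl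
        (fun acc b => 256*acc + b) 0)) (List.replicate 64 (0:Int))
  let w := (List.range' 16 48).foldl (fun (w : List Int) j =>
      let s0 := PySem.Int.bxor (PySem.Int.bxor (rotr (w.getD (j-15) 0) 7) (rotr (w.getD (j-15) 0) 18)) ((w.getD (j-15) 0) >>> (3:Nat))
      let s1 := PySem.Int.bxor (PySem.Int.bxor (rotr (w.getD (j-2) 0) 17) (rotr (w.getD (j-2) 0) 19)) ((w.getD (j-2) 0) >>> (10:Nat))
      w.set j (PySem.Int.band (w.getD (j-16) 0 + s0 + w.getD (j-7) 0 + s1) 0xffffffff)) w0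
  -- a, b, c, d, e, f, g, hh = h  (h always has 8 entries)
  match (List.range 64).foldl (fun (s : Int×Int×Int×Int×Int×Int×Int×Int) j =>
      match s with
      | (a, b, c, d, e, f, g, hh) =>
        let S1 := PySem.Int.bxor (PySem.Int.bxor (rotr e 6) (rotr e 11)) (rotr e 25)
        let ch := PySem.Int.bxor (PySem.Int.band e f) (PySem.Int.band (Int.not e) g)
        let temp1 := PySem.Int.band (hh + S1 + ch + pvK.getD j 0 + w.getD j 0) 0xffffffff
        let S0 := PySem.Int.bxor (PySem.Int.bxor (rotr a 2) (rotr a 13)) (rotr a 22)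
        let maj := PySem.Int.bxor (PySem.Int.bxor (PySem.Int.band a b) (PySem.Int.band a c)) (PySem.Int.band b c)
        let temp2 := PySem.Int.band (S0 + maj) 0xffffffff
        (PySem.Int.band (temp1 + temp2) 0xffffffff, a, b, c, PySem.Int.band (d + temp1) 0xffffffff, e, f, g))
    (h.getD 0 0, h.getD 1 0, h.getD 2 0, h.getD 3 0, h.getD 4 0, h.getD 5 0, h.getD 6 0, h.getD 7 0)
  with
  | (a, b, c, d, e, f, g, hh) =>
    [PySem.Int.band (h.getD 0 0 + a) 0xffffffff, PySem.Int.band (h.getD 1 0 + b) 0xffffffff,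
     PySem.Int.band (h.getD 2 0 + c) 0xffffffff, PySem.Int.band (h.getD 3 0 + d) 0xffffffff,
     PySem.Int.band (h.getD 4 0 + e) 0xffffffff, PySem.Int.band (h.getD 5 0 + f) 0xffffffff,
     PySem.Int.band (h.getD 6 0 + g) 0xffffffff, PySem.Int.band (h.getD 7 0 + hh) 0xffffffff]

-- f'{x:08x}': exact for 0 ≤ x < 16^8, which holds for every word of h
def pvHexDigitA (d : Int) : Char :=
  if d < 10 then Char.ofNat (48 + d.toNat) else Char.ofNat (87 + d.toNat)

def pvHexA (x : Int) : List Char :=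
  (List.range 8).map (fun i => pvHexDigitA (PySem.Int.mod (PySem.Int.floordiv x (16 ^ (7 - i))) 16))

def sha256_manual (message : String) : String :=
  -- message.encode('utf-8'): exact on Dom (ASCII code points are their own UTF-8 bytes)
  let msg_bytes : List Int := message.toList.map (fun c => (c.toNat : Int))
  let msg_len : Int := (msg_bytes.length : Int) * 8
  -- b'\x80' + b'\x00' * ((56 - (len+1) % 64) % 64); the count is a Python % 64 value, hence ≥ 0
  let padding : List Int :=
    0x80 :: List.replicate (PySem.Int.mod (56 - PySem.Int.mod ((msg_bytes.length : Int) + 1) 64) 64).toNat (0:Int)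
  let padded := msg_bytes ++ padding ++ pvToBytes8BE msg_len
  let h := (PySem.List.pyRange 0 ((padded.length : Int)) 64).foldl
      (fun h i => pvChunkStepA h (PySem.List.slice padded (some i) (some (i + 64)))) pvH
  -- ''.join(f'{x:08x}' for x in h)
  String.ofList ((h.map pvHexA).flatten)

-- ===== PORT B =====
-- Source B is hashlib.sha256(message.encode('utf-8')).hexdigest(); the library call has no Lean
-- counterpart, so it is ported as the FIPS-180-4 SHA-256 specification over Nat machine words
-- (all arithmetic mod 4294967296); byte-exact on Dom, where UTF-8 bytes are the code points.
def bK : List Nat := [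
  0x428a2f98, 0x71374491, 0xb5c0fbcf, 0xe9b5dba5, 0x3956c25b, 0x59f111f1, 0x923f82a4, 0xab1c5ed5,
  0xd807aa98, 0x12835b01, 0x243185be, 0x550c7dc3, 0x72be5d74, 0x80deb1fe, 0x9bdc06a7, 0xc19bf174,
  0xe49b69c1, 0xefbe4786, 0x0fc19dc6, 0x240ca1cc, 0x2de92c6f, 0x4a7484aa, 0x5cb0a9dc, 0x76f988da,
  0x983e5152, 0xa831c66d, 0xb00327c8, 0xbf597fc7, 0xc6e00bf3, 0xd5a79147, 0x06ca6351, 0x14292967,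
  0x27b70a85, 0x2e1b2138, 0x4d2c6dfc, 0x53380d13, 0x650a7354, 0x766a0abb, 0x81c2c92e, 0x92722c85,
  0xa2bfe8a1, 0xa81a664b, 0xc24b8b70, 0xc76c51a3, 0xd192e819, 0xd6990624, 0xf40e3585, 0x106aa070,
  0x19a4c116, 0x1e376c08, 0x2748774c, 0x34b0bcb5, 0x391c0cb3, 0x4ed8aa4a, 0x5b9cca4f, 0x682e6ff3,
  0x748f82ee, 0x78a5636f, 0x84c87814, 0x8cc70208, 0x90befffa, 0xa4506ceb, 0xbef9a3f7, 0xc67178f2]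

def bH0 : List Nat := [
  0x6a09e667, 0xbb67ae85, 0x3c6ef372, 0xa54ff53a,
  0x510e527f, 0x9b05688c, 0x1f83d9ab, 0x5be0cd19]

-- 32-bit right rotation
def bRotr (x n : Nat) : Nat := ((x >>> n) ||| (x <<< (32 - n))) % 4294967296

-- big-endian word j of a 64-byte block
def bWord (bs : List Nat) (j : Nat) : Nat :=
  bs.getD (4*j) 0 * 16777216 + bs.getD (4*j+1) 0 * 65536 + bs.getD (4*j+2) 0 * 256 + bs.getD (4*j+3) 0

-- grow the 16-word schedule to 64 words
def bExtend (w : List Nat) : List Nat :=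
  if _h : w.length < 64 then
    let x15 := w.getD (w.length - 15) 0
    let x2 := w.getD (w.length - 2) 0
    bExtend (w ++ [(w.getD (w.length - 16) 0
        + (((bRotr x15 7) ^^^ (bRotr x15 18)) ^^^ (x15 >>> 3))
        + w.getD (w.length - 7) 0
        + (((bRotr x2 17) ^^^ (bRotr x2 19)) ^^^ (x2 >>> 10))) % 4294967296])
  else w
termination_by 64 - w.length
decreasing_by simp; omega

-- one compression round
def bRound (k w : Nat) (s : Nat×Nat×Nat×Nat×Nat×Nat×Nat×Nat) : Nat×Nat×Nat×Nat×Nat×Nat×Nat×Nat :=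
  match s with
  | (a, b, c, d, e, f, g, h) =>
    let s1 := ((bRotr e 6) ^^^ (bRotr e 11)) ^^^ (bRotr e 25)
    let ch := (e &&& f) ^^^ ((e ^^^ 4294967295) &&& g)
    let t1 := (h + s1 + ch + k + w) % 4294967296
    let s0 := ((bRotr a 2) ^^^ (bRotr a 13)) ^^^ (bRotr a 22)
    let mj := ((a &&& b) ^^^ (a &&& c)) ^^^ (b &&& c)
    let t2 := (s0 + mj) % 4294967296
    ((t1 + t2) % 4294967296, a, b, c, (d + t1) % 4294967296, e, f, g)

-- compress one 64-byte block into the state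
def bCompress (h blk : List Nat) : List Nat :=
  let w := bExtend ((List.range 16).map (bWord blk))
  match h with
  | [h0, h1, h2, h3, h4, h5, h6, h7] =>
    match (bK.zip w).foldl (fun s kw => bRound kw.1 kw.2 s) (h0, h1, h2, h3, h4, h5, h6, h7) with
    | (a, b, c, d, e, f, g, hh) =>
      List.zipWith (fun x y => (x + y) % 4294967296) h [a, b, c, d, e, f, g, hh]
  | _ => h

-- split into 64-byte blocks
def bBlocks (bs : List Nat) : List (List Nat) :=
  if _h : bs.length < 64 then [] else bs.take 64 :: bBlocks (bs.drop 64)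
termination_by bs.length
decreasing_by simp; omega

-- 8-byte big-endian message length
def bLen8 (n : Nat) : List Nat := [56, 48, 40, 32, 24, 16, 8, 0].map (fun s => (n >>> s) % 256)

-- lowercase hex of one 32-bit word, nibble by nibble
def bHex (x : Nat) : List Char :=
  [28, 24, 20, 16, 12, 8, 4, 0].map (fun s => "0123456789abcdef".toList.getD ((x >>> s) &&& 15) ' ')

def sha256_manual_alt (message : String) : String :=
  let bs : List Nat := message.toList.map Char.toNat
  let padded := bs ++ 128 :: (List.replicate ((119 - bs.length % 64) % 64) 0 ++ bLen8 (8 * bs.length))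
  String.ofList (((bBlocks padded).foldl bCompress bH0).flatMap bHex)

-- ===== PRECONDITION & SPEC =====
def Spec_sha256_manual (message : String) (out : String) : Prop := out = sha256_manual_alt message
instance (message : String) (out : String) : Decidable (Spec_sha256_manual message out) := by unfold Spec_sha256_manual; infer_instance

-- ===== CLAIM (what is proved, stated in full; the proofs are below) =====
def Claim_equal_sha256_manual : Prop := ∀ (message : String), Dom_sha256_manual message → Spec_sha256_manual message (sha256_manual message)

-- ===== LEMMAS AND PROOFS =====

-- casting a Nat list into the Int world
def bCastL (l : List Nat) : List Int := l.map (fun x : Nat => (x : Int))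

def bInv8 (s : Nat×Nat×Nat×Nat×Nat×Nat×Nat×Nat) : Prop :=
  s.1 < 4294967296 ∧ s.2.1 < 4294967296 ∧ s.2.2.1 < 4294967296 ∧ s.2.2.2.1 < 4294967296 ∧
  s.2.2.2.2.1 < 4294967296 ∧ s.2.2.2.2.2.1 < 4294967296 ∧ s.2.2.2.2.2.2.1 < 4294967296 ∧
  s.2.2.2.2.2.2.2 < 4294967296

def bC8 (s : Nat×Nat×Nat×Nat×Nat×Nat×Nat×Nat) : Int×Int×Int×Int×Int×Int×Int×Int :=
  (s.1, s.2.1, s.2.2.1, s.2.2.2.1, s.2.2.2.2.1, s.2.2.2.2.2.1, s.2.2.2.2.2.2.1, s.2.2.2.2.2.2.2)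

def pvFromB (bs : List Int) : Int := bs.foldl (fun acc b => 256 * acc + b) 0

-- generic fold simulation under an invariant
lemma bFoldlSim {α β γ : Type} (c : β → γ) (P : β → Prop) (l : List α)
    (fA : γ → α → γ) (fB : β → α → β) (s0 : β) (h0 : P s0)
    (hstep : ∀ s a, a ∈ l → P s → fA (c s) a = c (fB s a) ∧ P (fB s a)) :
    l.foldl fA (c s0) = c (l.foldl fB s0) ∧ P (l.foldl fB s0) := by
  induction l generalizing s0 with
  | nil => exact ⟨rfl, h0⟩
  | cons x xs ih =>
    obtain ⟨hfx, hPx⟩ := hstep s0 x (List.mem_cons_self ..) h0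
    simp only [List.foldl_cons, hfx]
    exact ih (fB s0 x) hPx (fun s a ha hs => hstep s a (List.mem_cons_of_mem _ ha) hs)

lemma bMaskNat (x : Nat) : x &&& 4294967295 = x % 4294967296 := by
  have := Nat.and_two_pow_sub_one_eq_mod x 32; norm_num at this; exact this

lemma bAnd255 (x : Nat) : x &&& 255 = x % 256 := by
  have := Nat.and_two_pow_sub_one_eq_mod x 8; norm_num at this; exact this

lemma bCastMask (x : Nat) :
    PySem.Int.band ((x:Nat):Int) 4294967295 = ((x % 4294967296 : Nat) : Int) := by
  rw [show (4294967295:Int) = ((4294967295:Nat):Int) by norm_num, PySem.Int.band_natCast, bMaskNat]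

lemma bAddMask (x y : Nat) :
    PySem.Int.band (((x:Nat):Int) + ((y:Nat):Int)) 4294967295 = (((x+y) % 4294967296 : Nat) : Int) := by
  rw [← Nat.cast_add, bCastMask]

lemma bRotrCast (m n : Nat) (hm : m < 4294967296) :
    rotr ((m:Nat):Int) n = ((bRotr m n : Nat) : Int) := by
  rw [rotr, bRotr, ← Int.natCast_shiftRight, ← Int.natCast_shiftLeft,
      show (4294967295:Int) = ((4294967295:Nat):Int) by norm_num,
      PySem.Int.band_natCast, PySem.Int.bor_natCast]
  congr 1
  rw [← bMaskNat, Nat.and_or_distrib_right]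
  congr 1
  rw [bMaskNat, Nat.mod_eq_of_lt (lt_of_le_of_lt (Nat.shiftRight_le m n) hm)]

lemma bGetDCast (l : List Nat) (i : Nat) :
    (bCastL l).getD i 0 = ((l.getD i 0 : Nat) : Int) := by
  simp only [bCastL, List.getD_eq_getElem?_getD, List.getElem?_map]
  cases l[i]? <;> simp

lemma bGetDProp {P : Nat → Prop} (l : List Nat) (j : Nat) (h0 : P 0) (hl : ∀ x ∈ l, P x) :
    P (l.getD j 0) := by
  rw [List.getD_eq_getElem?_getD]
  cases hj : l[j]? with
  | none => exact h0
  | some v => exact hl v (List.mem_of_getElem? hj)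

-- Python's (~e) & g on 32-bit words
lemma subLdiff : ∀ g e : Nat, g - (g &&& e) = Nat.ldiff g e := by
  intro g
  induction g using Nat.binaryRec with
  | zero => intro e; simp [Nat.ldiff]
  | bit b m ih =>
    intro e
    rw [← Nat.bit_testBit_zero_shiftRight_one e]
    rw [Nat.land_bit, Nat.ldiff_bit]
    have h1 : m &&& (e >>> 1) ≤ m := Nat.and_le_left
    have h2 := ih (e >>> 1)
    simp only [Nat.bit]
    cases b <;> cases e.testBit 0 <;> simp <;> omega

lemma bNotBand (e g : Nat) (he : e < 4294967296) (hg : g < 4294967296) :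
    PySem.Int.band (Int.not ((e:Nat):Int)) ((g:Nat):Int)
      = (((e ^^^ 4294967295) &&& g : Nat) : Int) := by
  have hne : ¬ (0 ≤ Int.not ((e:Nat):Int)) := by simp [Int.not]
  unfold PySem.Int.band
  rw [if_neg hne, if_pos (by positivity : (0:Int) ≤ ((g:Nat):Int))]
  have h1 : (-(Int.not ((e:Nat):Int)) - 1).toNat = e := by simp [Int.not]
  have h2 : (((g:Nat):Int)).toNat = g := by simp
  rw [h1, h2, subLdiff]
  congr 1
  apply Nat.eq_of_testBit_eq
  intro i
  by_cases hi : i < 32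
  · have hm : (4294967295:Nat).testBit i = true := by
      have := Nat.testBit_two_pow_sub_one 32 i
      norm_num at this; simp [this, hi]
    simp only [Nat.testBit_ldiff, Nat.testBit_and, Nat.testBit_xor, hm]
    cases e.testBit i <;> cases g.testBit i <;> simp
  · have hpow : (4294967296:Nat) ≤ 2^i := by
      have h32 : (4294967296:Nat) = 2^32 := by norm_num
      rw [h32]; exact Nat.pow_le_pow_right (by norm_num) (by omega)
    have hei : e.testBit i = false := Nat.testBit_eq_false_of_lt (lt_of_lt_of_le he hpow)
    have hgi : g.testBit i = false := Nat.testBit_eq_false_of_lt (lt_of_lt_of_le hg hpow)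
    simp [Nat.testBit_ldiff, Nat.testBit_and, Nat.testBit_xor, hei, hgi]

lemma bLen8Cast (L : Nat) :
    pvToBytes8BE ((L:Int) * 8) = bCastL (bLen8 (8*L)) := by
  have hc : ((L:Int) * 8) = (((8*L : Nat)):Int) := by push_cast; ring
  rw [pvToBytes8BE, hc, bLen8, bCastL]
  simp only [List.map_cons, List.map_nil, ← Int.natCast_shiftRight,
    show (255:Int) = ((255:Nat):Int) by norm_num, PySem.Int.band_natCast, bAnd255]
  norm_num

lemma bPadCount (L : Nat) :
    (PySem.Int.mod (56 - PySem.Int.mod ((L:Int) + 1) 64) 64).toNat = (119 - L % 64) % 64 := by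
  rw [PySem.Int.mod_eq_emod_of_pos (by norm_num), PySem.Int.mod_eq_emod_of_pos (by norm_num)]
  omega

lemma bTake4 (l : List Nat) (k : Nat) (h : k + 4 ≤ l.length) :
    (l.drop k).take 4 = [l.getD k 0, l.getD (k+1) 0, l.getD (k+2) 0, l.getD (k+3) 0] := by
  apply List.ext_getElem
  · simp; omega
  · intro i h1 h2
    simp only [List.length_take, List.length_drop] at h1
    have hi : i < 4 := by omega
    simp only [List.getElem_take, List.getElem_drop]
    interval_cases i <;>
      simp only [List.getElem_cons_zero, List.getElem_cons_succ] <;>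
      rw [List.getD_eq_getElem _ _ (by omega)]
    all_goals rfl

lemma bFromBCast (b0 b1 b2 b3 : Nat) :
    pvFromB [((b0:Nat):Int), b1, b2, b3]
      = ((b0 * 16777216 + b1 * 65536 + b2 * 256 + b3 : Nat) : Int) := by
  simp [pvFromB]
  ring

lemma pvKCast : pvK = bCastL bK := by rfl

lemma pvHCast : pvH = bCastL bH0 := by rfl

-- the hex digit of each nibble agrees
lemma bDigit (m k : Nat) :
    pvHexDigitA (PySem.Int.mod (PySem.Int.floordiv (m : Int) (16 ^ k)) 16)
      = "0123456789abcdef".toList.getD ((m >>> (4*k)) &&& 15) ' ' := by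
  have hc16 : ((16:Int) ^ k) = ((16 ^ k : Nat) : Int) := by push_cast; ring
  have hfd : PySem.Int.floordiv (m : Int) (16 ^ k) = (((m / 16 ^ k : Nat)) : Int) := by
    rw [hc16]; exact_mod_cast PySem.Int.floordiv_natCast m (16 ^ k)
  have hmd : PySem.Int.mod (((m / 16 ^ k : Nat)) : Int) 16 = (((m / 16 ^ k % 16 : Nat)) : Int) := by
    exact_mod_cast PySem.Int.mod_natCast (m / 16 ^ k) 16
  have hnat : m >>> (4*k) &&& 15 = m / 16 ^ k % 16 := by
    rw [Nat.shiftRight_eq_div_pow]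
    have h15 := Nat.and_two_pow_sub_one_eq_mod (m / 2 ^ (4*k)) 4
    norm_num at h15
    rw [h15, pow_mul]
    norm_num
  rw [hfd, hmd, hnat]
  have hlt : m / 16 ^ k % 16 < 16 := Nat.mod_lt _ (by norm_num)
  set d := m / 16 ^ k % 16
  interval_cases d <;> decide

lemma bZipKW (w : List Nat) (hw : w.length = 64) :
    bK.zip w = (List.range 64).map (fun j => (bK.getD j 0, w.getD j 0)) := by
  have hk : bK.length = 64 := by rfl
  apply List.ext_getElem
  · simp [hk, hw]
  · intro i h1 h2
    simp only [List.getElem_zip, List.getElem_map, List.getElem_range]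
    have hi : i < 64 := by simp [hk, hw] at h1; omega
    rw [List.getD_eq_getElem _ _ (by omega), List.getD_eq_getElem _ _ (by omega)]

-- one round of A, on casts, is a cast of one round of B
lemma bRoundCast (s : Nat×Nat×Nat×Nat×Nat×Nat×Nat×Nat) (kj wj : Nat) (hs : bInv8 s) :
    (match bC8 s with
      | (a, b, c, d, e, f, g, hh) =>
        let S1 := PySem.Int.bxor (PySem.Int.bxor (rotr e 6) (rotr e 11)) (rotr e 25)
        let ch := PySem.Int.bxor (PySem.Int.band e f) (PySem.Int.band (Int.not e) g)
        let temp1 := PySem.Int.band (hh + S1 + ch + ((kj:Nat):Int) + ((wj:Nat):Int)) 0xffffffff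
        let S0 := PySem.Int.bxor (PySem.Int.bxor (rotr a 2) (rotr a 13)) (rotr a 22)
        let maj := PySem.Int.bxor (PySem.Int.bxor (PySem.Int.band a b) (PySem.Int.band a c)) (PySem.Int.band b c)
        let temp2 := PySem.Int.band (S0 + maj) 0xffffffff
        (PySem.Int.band (temp1 + temp2) 0xffffffff, a, b, c, PySem.Int.band (d + temp1) 0xffffffff, e, f, g))
    = bC8 (bRound kj wj s) ∧ bInv8 (bRound kj wj s) := by
  obtain ⟨a, b, c, d, e, f, g, hh⟩ := s
  obtain ⟨ha, hb, hc, hd, he, hf, hg, hhh⟩ := hs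
  simp only at ha hb hc hd he hf hg hhh
  constructor
  · simp only [bC8, bRound]
    rw [bRotrCast e 6 he, bRotrCast e 11 he, bRotrCast e 25 he,
        bRotrCast a 2 ha, bRotrCast a 13 ha, bRotrCast a 22 ha,
        bNotBand e g he hg]
    simp only [PySem.Int.bxor_natCast, PySem.Int.band_natCast]
    rw [show ((hh:Nat):Int) + ((((bRotr e 6 ^^^ bRotr e 11) ^^^ bRotr e 25 : Nat)):Int)
          + (((e &&& f) ^^^ ((e ^^^ 4294967295) &&& g) : Nat) : Int) + ((kj:Nat):Int) + ((wj:Nat):Int)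
        = (((hh + ((bRotr e 6 ^^^ bRotr e 11) ^^^ bRotr e 25)
          + ((e &&& f) ^^^ ((e ^^^ 4294967295) &&& g)) + kj + wj : Nat)) : Int) by push_cast; ring,
        bCastMask]
    rw [show ((((bRotr a 2 ^^^ bRotr a 13) ^^^ bRotr a 22 : Nat)):Int)
          + ((((a &&& b) ^^^ (a &&& c)) ^^^ (b &&& c) : Nat) : Int)
        = (((((bRotr a 2 ^^^ bRotr a 13) ^^^ bRotr a 22)
          + (((a &&& b) ^^^ (a &&& c)) ^^^ (b &&& c)) : Nat)) : Int) by push_cast; ring,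
        bCastMask]
    rw [show ((d:Nat):Int) + ((((hh + ((bRotr e 6 ^^^ bRotr e 11) ^^^ bRotr e 25)
          + ((e &&& f) ^^^ ((e ^^^ 4294967295) &&& g)) + kj + wj) % 4294967296 : Nat)) : Int)
        = (((d + (hh + ((bRotr e 6 ^^^ bRotr e 11) ^^^ bRotr e 25)
          + ((e &&& f) ^^^ ((e ^^^ 4294967295) &&& g)) + kj + wj) % 4294967296 : Nat)) : Int) by push_cast; ring,
        bCastMask]
    rw [← Nat.cast_add, bCastMask]
  · simp only [bRound, bInv8]
    refine ⟨Nat.mod_lt _ (by norm_num), ha, hb, hc, Nat.mod_lt _ (by norm_num), he, hf, hg⟩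

-- the 64 rounds: A's indexing loop simulates B's fold over zip(K, w)
lemma bRoundsSim (w : List Nat) (hw : w.length = 64) (_hwi : ∀ x ∈ w, x < 4294967296)
    (s0 : Nat×Nat×Nat×Nat×Nat×Nat×Nat×Nat) (hs : bInv8 s0) :
    ((List.range 64).foldl (fun (s : Int×Int×Int×Int×Int×Int×Int×Int) j =>
      match s with
      | (a, b, c, d, e, f, g, hh) =>
        let S1 := PySem.Int.bxor (PySem.Int.bxor (rotr e 6) (rotr e 11)) (rotr e 25)
        let ch := PySem.Int.bxor (PySem.Int.band e f) (PySem.Int.band (Int.not e) g)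
        let temp1 := PySem.Int.band (hh + S1 + ch + pvK.getD j 0 + (bCastL w).getD j 0) 0xffffffff
        let S0 := PySem.Int.bxor (PySem.Int.bxor (rotr a 2) (rotr a 13)) (rotr a 22)
        let maj := PySem.Int.bxor (PySem.Int.bxor (PySem.Int.band a b) (PySem.Int.band a c)) (PySem.Int.band b c)
        let temp2 := PySem.Int.band (S0 + maj) 0xffffffff
        (PySem.Int.band (temp1 + temp2) 0xffffffff, a, b, c, PySem.Int.band (d + temp1) 0xffffffff, e, f, g)) (bC8 s0)
      = bC8 ((bK.zip w).foldl (fun s kw => bRound kw.1 kw.2 s) s0))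
    ∧ bInv8 ((bK.zip w).foldl (fun s kw => bRound kw.1 kw.2 s) s0) := by
  rw [bZipKW w hw, List.foldl_map]
  refine bFoldlSim bC8 bInv8 (List.range 64) _ _ s0 hs (fun s j _ hP => ?_)
  have hkj : pvK.getD j 0 = ((bK.getD j 0 : Nat) : Int) := by
    rw [pvKCast, bGetDCast]
  have hwj : (bCastL w).getD j 0 = ((w.getD j 0 : Nat) : Int) := bGetDCast w j
  rw [hkj, hwj]
  exact bRoundCast s (bK.getD j 0) (w.getD j 0) hP

-- A's first schedule loop: successive writes at 0..m-1 into a long enough base list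
lemma pvSetFold (f : Nat → Int) (m : Nat) (base : List Int) (hm : m ≤ base.length) :
    (List.range m).foldl (fun w j => w.set j (f j)) base = (List.range m).map f ++ base.drop m := by
  induction m with
  | zero => simp
  | succ m ih =>
    rw [List.range_succ, List.foldl_append, ih (by omega)]
    simp only [List.foldl_cons, List.foldl_nil, List.map_append, List.map_cons, List.map_nil]
    rw [List.set_append, if_neg (by simp)]
    have hd : base.drop m = base[m] :: base.drop (m+1) :=
      (List.getElem_cons_drop (by omega)).symm
    simp only [List.length_map, List.length_range, Nat.sub_self]
    rw [hd, List.set_cons_zero]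
    simp

-- A's second schedule loop simulates B's recursive extension
lemma bExtendSim : ∀ (n : Nat) (ws : List Nat), 16 ≤ ws.length → ws.length + n = 64 →
    (∀ x ∈ ws, x < 4294967296) →
    ((List.range' ws.length n).foldl (fun (w : List Int) j =>
        let s0 := PySem.Int.bxor (PySem.Int.bxor (rotr (w.getD (j-15) 0) 7) (rotr (w.getD (j-15) 0) 18)) ((w.getD (j-15) 0) >>> (3:Nat))
        let s1 := PySem.Int.bxor (PySem.Int.bxor (rotr (w.getD (j-2) 0) 17) (rotr (w.getD (j-2) 0) 19)) ((w.getD (j-2) 0) >>> (10:Nat))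
        w.set j (PySem.Int.band (w.getD (j-16) 0 + s0 + w.getD (j-7) 0 + s1) 0xffffffff)) (bCastL ws ++ List.replicate n 0)
      = bCastL (bExtend ws))
    ∧ (bExtend ws).length = 64 ∧ (∀ x ∈ bExtend ws, x < 4294967296) := by
  intro n
  induction n with
  | zero =>
    intro ws h16 hlen hinv
    rw [bExtend, dif_neg (by omega : ¬ ws.length < 64)]
    exact ⟨by simp, by omega, hinv⟩
  | succ n ih =>
    intro ws h16 hlen hinv
    have h64 : ws.length < 64 := by omega
    have hcastlen : (bCastL ws).length = ws.length := by simp [bCastL]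
    have hgd : ∀ k : Nat, (bCastL ws ++ List.replicate (n+1) (0:Int)).getD (ws.length - k) 0
        = ((ws.getD (ws.length - k) 0 : Nat) : Int) := by
      intro k
      rcases Nat.eq_zero_or_pos k with rfl | hk
      · have hz : ws.getD ws.length 0 = 0 := by
          rw [List.getD_eq_getElem?_getD, List.getElem?_eq_none (le_refl _)]; rfl
        rw [Nat.sub_zero, hz, List.getD_eq_getElem?_getD,
            List.getElem?_append_right (by simp [bCastL])]
        simp [bCastL]
      · rw [List.getD_append _ _ _ _ (by simp [bCastL]; omega), bGetDCast]
    have hb15 : ws.getD (ws.length - 15) 0 < 4294967296 := bGetDProp _ _ (by norm_num) hinv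
    have hb2 : ws.getD (ws.length - 2) 0 < 4294967296 := bGetDProp _ _ (by norm_num) hinv
    have hset : ∀ v : Int, (bCastL ws ++ List.replicate (n+1) (0:Int)).set ws.length v
        = (bCastL ws ++ [v]) ++ List.replicate n 0 := by
      intro v
      rw [List.set_append, if_neg (by simp [bCastL])]
      simp [bCastL, List.replicate_succ]
    rw [List.range'_succ]
    simp only [List.foldl_cons]
    rw [hgd 15, hgd 2, hgd 16, hgd 7,
        bRotrCast _ 7 hb15, bRotrCast _ 18 hb15, bRotrCast _ 17 hb2, bRotrCast _ 19 hb2,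
        ← Int.natCast_shiftRight, ← Int.natCast_shiftRight]
    simp only [PySem.Int.bxor_natCast]
    rw [show ((ws.getD (ws.length - 16) 0 : Nat) : Int)
          + ((((bRotr (ws.getD (ws.length - 15) 0) 7 ^^^ bRotr (ws.getD (ws.length - 15) 0) 18) ^^^ (ws.getD (ws.length - 15) 0) >>> 3 : Nat)) : Int)
          + ((ws.getD (ws.length - 7) 0 : Nat) : Int)
          + ((((bRotr (ws.getD (ws.length - 2) 0) 17 ^^^ bRotr (ws.getD (ws.length - 2) 0) 19) ^^^ (ws.getD (ws.length - 2) 0) >>> 10 : Nat)) : Int)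
        = (((ws.getD (ws.length - 16) 0
          + ((bRotr (ws.getD (ws.length - 15) 0) 7 ^^^ bRotr (ws.getD (ws.length - 15) 0) 18) ^^^ (ws.getD (ws.length - 15) 0) >>> 3)
          + ws.getD (ws.length - 7) 0
          + ((bRotr (ws.getD (ws.length - 2) 0) 17 ^^^ bRotr (ws.getD (ws.length - 2) 0) 19) ^^^ (ws.getD (ws.length - 2) 0) >>> 10) : Nat)) : Int) by
      push_cast; ring]
    rw [bCastMask, hset]
    have hcastapp : (bCastL ws ++ [((( (ws.getD (ws.length - 16) 0
          + ((bRotr (ws.getD (ws.length - 15) 0) 7 ^^^ bRotr (ws.getD (ws.length - 15) 0) 18) ^^^ (ws.getD (ws.length - 15) 0) >>> 3)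
          + ws.getD (ws.length - 7) 0
          + ((bRotr (ws.getD (ws.length - 2) 0) 17 ^^^ bRotr (ws.getD (ws.length - 2) 0) 19) ^^^ (ws.getD (ws.length - 2) 0) >>> 10)) % 4294967296 : Nat)) : Int)])
        = bCastL (ws ++ [(ws.getD (ws.length - 16) 0
          + ((bRotr (ws.getD (ws.length - 15) 0) 7 ^^^ bRotr (ws.getD (ws.length - 15) 0) 18) ^^^ (ws.getD (ws.length - 15) 0) >>> 3)
          + ws.getD (ws.length - 7) 0
          + ((bRotr (ws.getD (ws.length - 2) 0) 17 ^^^ bRotr (ws.getD (ws.length - 2) 0) 19) ^^^ (ws.getD (ws.length - 2) 0) >>> 10)) % 4294967296]) := by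
      simp [bCastL]
    rw [hcastapp]
    have hlen' : (ws ++ [(ws.getD (ws.length - 16) 0
          + ((bRotr (ws.getD (ws.length - 15) 0) 7 ^^^ bRotr (ws.getD (ws.length - 15) 0) 18) ^^^ (ws.getD (ws.length - 15) 0) >>> 3)
          + ws.getD (ws.length - 7) 0
          + ((bRotr (ws.getD (ws.length - 2) 0) 17 ^^^ bRotr (ws.getD (ws.length - 2) 0) 19) ^^^ (ws.getD (ws.length - 2) 0) >>> 10)) % 4294967296]).length = ws.length + 1 := by simp
    have hinv' : ∀ x ∈ (ws ++ [(ws.getD (ws.length - 16) 0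
          + ((bRotr (ws.getD (ws.length - 15) 0) 7 ^^^ bRotr (ws.getD (ws.length - 15) 0) 18) ^^^ (ws.getD (ws.length - 15) 0) >>> 3)
          + ws.getD (ws.length - 7) 0
          + ((bRotr (ws.getD (ws.length - 2) 0) 17 ^^^ bRotr (ws.getD (ws.length - 2) 0) 19) ^^^ (ws.getD (ws.length - 2) 0) >>> 10)) % 4294967296]), x < 4294967296 := by
      intro x hx
      rcases List.mem_append.mp hx with hx | hx
      · exact hinv x hx
      · simp only [List.mem_singleton] at hx
        subst hx
        exact Nat.mod_lt _ (by norm_num)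
    have hrec := ih _ (by omega) (by omega) hinv'
    rw [hlen'] at hrec
    have hunf : bExtend ws = bExtend (ws ++ [(ws.getD (ws.length - 16) 0
          + ((bRotr (ws.getD (ws.length - 15) 0) 7 ^^^ bRotr (ws.getD (ws.length - 15) 0) 18) ^^^ (ws.getD (ws.length - 15) 0) >>> 3)
          + ws.getD (ws.length - 7) 0
          + ((bRotr (ws.getD (ws.length - 2) 0) 17 ^^^ bRotr (ws.getD (ws.length - 2) 0) 19) ^^^ (ws.getD (ws.length - 2) 0) >>> 10)) % 4294967296]) := by
      rw [bExtend, dif_pos h64]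
    rw [hunf]
    exact ⟨hrec.1, hrec.2.1, hrec.2.2⟩

lemma bList8 (l : List Nat) (h : l.length = 8) :
    ∃ a0 a1 a2 a3 a4 a5 a6 a7 : Nat, l = [a0, a1, a2, a3, a4, a5, a6, a7] := by
  match l, h with
  | [a0, a1, a2, a3, a4, a5, a6, a7], _ => exact ⟨a0, a1, a2, a3, a4, a5, a6, a7, rfl⟩

-- one chunk: A's loop body simulates B's _compress
lemma bCompressSim (h blk : List Nat) (hh8 : h.length = 8) (hinv : ∀ x ∈ h, x < 4294967296)
    (hb : blk.length = 64) (hbyte : ∀ x ∈ blk, x < 256) :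
    pvChunkStepA (bCastL h) (bCastL blk) = bCastL (bCompress h blk)
    ∧ (bCompress h blk).length = 8 ∧ ∀ x ∈ bCompress h blk, x < 4294967296 := by
  have hstage1 : (List.range 16).foldl (fun (w : List Int) j =>
      w.set j ((PySem.List.slice (bCastL blk) (some ((j*4 : Nat) : Int)) (some (((j*4 : Nat) : Int) + ((4:Nat) : Int)))).foldl
        (fun acc b => 256*acc + b) 0)) (List.replicate 64 (0:Int))
      = bCastL ((List.range 16).map (bWord blk)) ++ List.replicate 48 0 := by
    rw [pvSetFold _ 16 _ (by simp), List.drop_replicate]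
    norm_num
    simp only [bCastL, List.map_map]
    apply List.map_congr_left
    intro j hj
    have hj16 : j < 16 := List.mem_range.mp hj
    have e1 : ((j:Int) * 4) = ((j*4 : Nat) : Int) := by push_cast; ring
    have e2 : (((j*4 : Nat) : Int) + 4) = (((j*4 : Nat) : Int) + ((4:Nat) : Int)) := by norm_num
    rw [e1, e2, PySem.List.slice_natCast_add (List.map (fun x : Nat => (x:Int)) blk) (j*4) 4]
    rw [show (List.map (fun x : Nat => (x:Int)) blk).drop (j*4) = List.map (fun x : Nat => (x:Int)) (blk.drop (j*4)) by simp,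
        show (List.map (fun x : Nat => (x:Int)) (blk.drop (j*4))).take 4 = List.map (fun x : Nat => (x:Int)) ((blk.drop (j*4)).take 4) by simp]
    rw [bTake4 blk (j*4) (by omega)]
    show pvFromB [((blk.getD (j*4) 0 : Nat) : Int), ((blk.getD (j*4+1) 0 : Nat) : Int),
        ((blk.getD (j*4+2) 0 : Nat) : Int), ((blk.getD (j*4+3) 0 : Nat) : Int)]
      = ((bWord blk j : Nat) : Int)
    rw [bFromBCast, bWord, Nat.mul_comm 4 j]
  have hw16len : ((List.range 16).map (bWord blk)).length = 16 := by simp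
  have hw16inv : ∀ x ∈ (List.range 16).map (bWord blk), x < 4294967296 := by
    intro x hx
    simp only [List.mem_map, List.mem_range] at hx
    obtain ⟨j, hj, rfl⟩ := hx
    have b0 : blk.getD (4*j) 0 < 256 := bGetDProp _ _ (by norm_num) hbyte
    have b1 : blk.getD (4*j+1) 0 < 256 := bGetDProp _ _ (by norm_num) hbyte
    have b2 : blk.getD (4*j+2) 0 < 256 := bGetDProp _ _ (by norm_num) hbyte
    have b3 : blk.getD (4*j+3) 0 < 256 := bGetDProp _ _ (by norm_num) hbyte
    rw [bWord]
    omega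
  have hext := bExtendSim 48 ((List.range 16).map (bWord blk)) (by omega) (by omega) hw16inv
  rw [hw16len] at hext
  have hextlen : (bExtend ((List.range 16).map (bWord blk))).length = 64 := hext.2.1
  obtain ⟨a0, a1, a2, a3, a4, a5, a6, a7, rfl⟩ := bList8 h hh8
  have hc0 : a0 < 4294967296 := hinv a0 (by simp)
  have hc1 : a1 < 4294967296 := hinv a1 (by simp)
  have hc2 : a2 < 4294967296 := hinv a2 (by simp)
  have hc3 : a3 < 4294967296 := hinv a3 (by simp)
  have hc4 : a4 < 4294967296 := hinv a4 (by simp)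
  have hc5 : a5 < 4294967296 := hinv a5 (by simp)
  have hc6 : a6 < 4294967296 := hinv a6 (by simp)
  have hc7 : a7 < 4294967296 := hinv a7 (by simp)
  have hrounds := bRoundsSim (bExtend ((List.range 16).map (bWord blk))) hextlen hext.2.2
      (a0, a1, a2, a3, a4, a5, a6, a7) ⟨hc0, hc1, hc2, hc3, hc4, hc5, hc6, hc7⟩
  rcases hfold : ((bK.zip (bExtend ((List.range 16).map (bWord blk)))).foldl
      (fun s kw => bRound kw.1 kw.2 s) (a0, a1, a2, a3, a4, a5, a6, a7))
    with ⟨r0, r1, r2, r3, r4, r5, r6, r7⟩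
  rw [hfold] at hrounds
  obtain ⟨hr0, hr1, hr2, hr3, hr4, hr5, hr6, hr7⟩ := hrounds.2
  simp only at hr0 hr1 hr2 hr3 hr4 hr5 hr6 hr7
  have hgd8 : ∀ i : Nat, (bCastL [a0, a1, a2, a3, a4, a5, a6, a7]).getD i 0
      = (([a0, a1, a2, a3, a4, a5, a6, a7].getD i 0 : Nat) : Int) :=
    fun i => bGetDCast _ i
  refine ⟨?_, ?_, ?_⟩
  · rw [pvChunkStepA, bCompress]
    simp only [hstage1, hext.1]
    simp only [show bCastL [a0, a1, a2, a3, a4, a5, a6, a7]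
        = [((a0:Nat):Int), a1, a2, a3, a4, a5, a6, a7] from rfl,
      List.getD_cons_zero, List.getD_cons_succ]
    rw [show ((((a0:Nat):Int)), ((a1:Nat):Int), ((a2:Nat):Int), ((a3:Nat):Int), ((a4:Nat):Int),
        ((a5:Nat):Int), ((a6:Nat):Int), ((a7:Nat):Int))
        = bC8 (a0, a1, a2, a3, a4, a5, a6, a7) from rfl, hrounds.1]
    simp only [bC8, bAddMask]
    rw [hfold]
    rfl
  · rw [bCompress]
    simp only [hfold]
    rfl
  · rw [bCompress]
    simp only [hfold]
    intro x hx
    simp only [List.zipWith_cons_cons, List.zipWith_nil_right, List.mem_cons,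
      List.not_mem_nil, or_false] at hx
    rcases hx with rfl | rfl | rfl | rfl | rfl | rfl | rfl | rfl <;> exact Nat.mod_lt _ (by norm_num)

lemma bHexCast (m : Nat) : pvHexA ((m:Nat):Int) = bHex m := by
  rw [pvHexA, bHex]
  have h8 : List.range 8 = [0, 1, 2, 3, 4, 5, 6, 7] := rfl
  rw [h8]
  simp only [List.map_cons, List.map_nil, bDigit]

lemma bBlocksNil (l : List Nat) (h : l.length < 64) : bBlocks l = [] := by
  rw [bBlocks, dif_pos h]

lemma bBlocksCons (bs : List Nat) (h : 64 ≤ bs.length) :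
    bBlocks bs = bs.take 64 :: bBlocks (bs.drop 64) := by
  rw [bBlocks, dif_neg (by omega)]

lemma bBlocksMap : ∀ (n : Nat) (l : List Nat), l.length = 64*n →
    (List.range n).map (fun k => (l.drop (64*k)).take 64) = bBlocks l := by
  intro n
  induction n with
  | zero =>
    intro l hl
    rw [bBlocksNil l (by omega)]
    simp
  | succ n ih =>
    intro l hl
    rw [bBlocksCons l (by omega), List.range_succ_eq_map]
    simp only [List.map_cons, List.map_map]
    refine congrArg₂ List.cons (by simp) ?_
    rw [← ih (l.drop 64) (by simp [hl]; omega)]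
    apply List.map_congr_left
    intro k hk
    have hdd : l.drop (64*(k+1)) = (l.drop 64).drop (64*k) := by
      rw [List.drop_drop]; congr 1; ring
    simp [Function.comp, Nat.succ_eq_add_one, hdd]

lemma bBlocksFacts (n : Nat) (l : List Nat) (hl : l.length = 64*n) :
    ∀ c ∈ bBlocks l, c.length = 64 ∧ ∀ x ∈ c, x ∈ l := by
  rw [← bBlocksMap n l hl]
  intro c hc
  simp only [List.mem_map, List.mem_range] at hc
  obtain ⟨k, hk, rfl⟩ := hc
  constructor
  · simp [hl]; omega
  · intro x hx
    exact List.mem_of_mem_drop (List.mem_of_mem_take hx)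

lemma pvRange64 (n : Nat) : PySem.List.pyRange 0 ((64*n : Nat) : Int) 64
    = (List.range n).map (fun k => ((64*k : Nat) : Int)) := by
  rw [PySem.List.pyRange_of_pos 0 ((64*n : Nat) : Int) (by norm_num : (0:Int) < 64)]
  rcases Nat.eq_zero_or_pos n with h | h
  · subst h; simp
  · rw [if_pos (by push_cast; positivity)]
    have hceil : (((64*n : Nat) : Int) - 0 + 64 - 1) / 64 = (n : Int) := by
      push_cast; omega
    rw [hceil]
    norm_num

lemma bDomBytes (message : String) (hdom : Dom_sha256_manual message) :
    ∀ x ∈ message.toList.map Char.toNat, x < 256 := by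
  intro x hx
  simp only [List.mem_map] at hx
  obtain ⟨ch, hc, rfl⟩ := hx
  have hch : pvDomChar ch = true := by
    unfold Dom_sha256_manual pvDomStr at hdom
    exact List.all_eq_true.mp hdom ch hc
  unfold pvDomChar at hch
  simp only [Bool.or_eq_true, Bool.and_eq_true, decide_eq_true_eq, beq_iff_eq] at hch
  omega

-- ===== VERDICT (by name: the statement is the Claim_ definition above) =====
theorem sha256_manual_spec : Claim_equal_sha256_manual := by
  intro message hdom
  unfold Spec_sha256_manual
  show sha256_manual message = sha256_manual_alt message
  rw [sha256_manual, sha256_manual_alt]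
  set bs := message.toList.map Char.toNat with hbs
  have hmsg : message.toList.map (fun c => ((c.toNat : Int))) = bCastL bs := by
    rw [hbs, bCastL, List.map_map]; rfl
  rw [hmsg]
  have hclen : (bCastL bs).length = bs.length := by simp [bCastL]
  rw [hclen, bPadCount bs.length, bLen8Cast bs.length]
  have hbyte : ∀ x ∈ bs, x < 256 := bDomBytes message hdom
  set pN := bs ++ 128 :: (List.replicate ((119 - bs.length % 64) % 64) 0 ++ bLen8 (8 * bs.length))
    with hpN
  have hcast : bCastL bs ++ (((0x80 : Int) :: List.replicate ((119 - bs.length % 64) % 64) (0:Int))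
      ++ bCastL (bLen8 (8 * bs.length))) = bCastL pN := by
    simp [hpN, bCastL]
  simp only [List.cons_append, List.append_assoc] at hcast ⊢
  rw [hcast]
  have hpbyte : ∀ x ∈ pN, x < 256 := by
    intro x hx
    rw [hpN] at hx
    rcases List.mem_append.mp hx with hx | hx
    · exact hbyte x hx
    · rcases List.mem_cons.mp hx with rfl | hx
      · norm_num
      · rcases List.mem_append.mp hx with hx | hx
        · have := List.eq_of_mem_replicate hx; omega
        · rw [bLen8] at hx
          simp only [List.mem_map] at hx
          obtain ⟨s, _, rfl⟩ := hx
          exact Nat.mod_lt _ (by norm_num)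
  have hplen : pN.length = bs.length + 1 + (((119 - bs.length % 64) % 64) + 8) := by
    rw [hpN]; simp [bLen8]; omega
  obtain ⟨n, hn⟩ : ∃ n, pN.length = 64 * n := by
    refine ⟨pN.length / 64, ?_⟩
    rw [hplen]
    omega
  have hcplen : ((bCastL pN).length : Int) = (((64*n : Nat) : Nat) : Int) := by
    simp [bCastL, hn]
  rw [hcplen, pvRange64 n, List.foldl_map]
  have hsl : ∀ (y : Nat), PySem.List.slice (bCastL pN) (some (Nat.cast (64*y))) (some ((Nat.cast (64*y) : Int) + 64))
      = ((bCastL pN).drop (64*y)).take 64 := by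
    intro y
    have e : ((Nat.cast (64*y) : Int) + 64) = (Nat.cast (64*y + 64) : Int) := by push_cast; ring
    rw [e, PySem.List.slice_natCast]
    congr 1
    omega
  simp only [hsl]
  rw [← List.foldl_map (f := fun k : Nat => ((bCastL pN).drop (64*k)).take 64) (g := pvChunkStepA)]
  have hmapcast : (List.range n).map (fun k : Nat => ((bCastL pN).drop (64*k)).take 64)
      = (bBlocks pN).map bCastL := by
    rw [← bBlocksMap n pN hn, List.map_map]
    apply List.map_congr_left
    intro k _
    simp [bCastL, Function.comp]
  rw [hmapcast, List.foldl_map, pvHCast]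
  have hsim := bFoldlSim bCastL (fun h => h.length = 8 ∧ ∀ x ∈ h, x < 4294967296) (bBlocks pN)
      (fun s c => pvChunkStepA s (bCastL c)) bCompress bH0
      ⟨rfl, by intro x hx; fin_cases hx <;> norm_num⟩
      (fun s a ha hP => by
        obtain ⟨hlen, hmem⟩ := bBlocksFacts n pN hn a ha
        obtain ⟨h1, h2, h3⟩ := bCompressSim s a hP.1 hP.2 hlen (fun x hx => hpbyte x (hmem x hx))
        exact ⟨h1, h2, h3⟩)
  rw [hsim.1]
  refine congrArg String.ofList ?_
  rw [bCastL, List.map_map, show (List.flatMap bHex ((bBlocks pN).foldl bCompress bH0))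
      = (((bBlocks pN).foldl bCompress bH0).map bHex).flatten by rw [List.flatMap_def]]
  refine congrArg List.flatten (List.map_congr_left ?_)
  intro x _
  exact bHexCast x
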